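-- pv_equiv track=rewrite | github.com/Eman-elnagggar/Graduation-Project | Data Analysis & AI/tests/CBC/main.py | apply_medical_constraints
-- ===== SOURCE A (Python) =====
-- def apply_medical_constraints(results):
--     conflicts = [
--         ('Leukopenia', 'Leukocytosis'),
--         ('Anemia', 'Elevated Hemoglobin'),
--         ('Microcytosis', 'Macrocytosis')
--     ]
--
--     final = results.copy()
--
--     for a, b in conflicts:
--         if a in final and b in final:
--             if final[a] >= final[b]:
--                 final.pop(b)
--             else:
--                 final.pop(a)
--
--     return final
-- ===== SOURCE B (Python) =====
-- def apply_medical_constraints(results):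
--     # Static partner table: each of the six conflict names maps to its rival
--     # and a flag saying whether it wins ties (the pair's first name does).
--     partner = {
--         'Leukopenia': ('Leukocytosis', True),
--         'Leukocytosis': ('Leukopenia', False),
--         'Anemia': ('Elevated Hemoglobin', True),
--         'Elevated Hemoglobin': ('Anemia', False),
--         'Microcytosis': ('Macrocytosis', True),
--         'Macrocytosis': ('Microcytosis', False),
--     }
--
--     def keep(k):
--         info = partner.get(k)
--         if info is None:
--             return True
--         rival, wins_tie = info
--         if rival not in results:
--             return True
--         return results[rival] < results[k] or (results[rival] == results[k] and wins_tie)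
--
--     # One pass over the entries: keep every key its rival does not beat.
--     return {k: v for k, v in results.items() if keep(k)}
-- ===== Notes on version B (the rewrite author's own statement) =====
-- stated objective: alternative
-- what changed: A loops over the three conflict pairs, mutating one dict by popping the loser of each; B has no pair loop or deletion at all: it builds a static partner table (rival + tie-winner flag per name) and produces the result in one pass over the entries with a per-key keep predicate.
import Mathlib
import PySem

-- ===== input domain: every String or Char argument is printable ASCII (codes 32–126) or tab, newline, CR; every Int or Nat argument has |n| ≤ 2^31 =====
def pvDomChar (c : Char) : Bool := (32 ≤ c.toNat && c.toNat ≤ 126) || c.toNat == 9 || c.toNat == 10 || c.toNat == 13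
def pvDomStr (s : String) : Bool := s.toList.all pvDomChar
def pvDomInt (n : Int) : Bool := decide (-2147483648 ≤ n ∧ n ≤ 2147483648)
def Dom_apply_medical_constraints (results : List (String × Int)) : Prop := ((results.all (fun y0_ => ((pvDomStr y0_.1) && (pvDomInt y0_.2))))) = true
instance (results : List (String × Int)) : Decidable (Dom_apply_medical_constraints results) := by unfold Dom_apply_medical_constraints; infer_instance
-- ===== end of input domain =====

-- B replaces A's pop-the-loser loop over the conflict pairs by a single filtering
-- pass over the entries with a static partner table; same cost, different shape.

-- ===== PORT A =====
def pvConflictsA : List (String × String) :=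
  [("Leukopenia", "Leukocytosis"),
   ("Anemia", "Elevated Hemoglobin"),
   ("Microcytosis", "Macrocytosis")]

def apply_medical_constraints (results : List (String × Int)) : List (String × Int) :=
  (pvConflictsA.foldl
    (fun final ab =>
      if final.contains ab.1 && final.contains ab.2 then
        -- final[a] / final[b] are guarded by the containment test, so getD is exact
        if final.getD ab.1 0 ≥ final.getD ab.2 0 then final.erase ab.2
        else final.erase ab.1
      else final)
    (PySem.Dict.mk results)).items

-- ===== PORT B =====
-- the static partner table: each conflict name ↦ (its rival, does it win ties?)
def pvPartnerPairs : List (String × (String × Bool)) :=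
  [("Leukopenia", ("Leukocytosis", true)),
   ("Leukocytosis", ("Leukopenia", false)),
   ("Anemia", ("Elevated Hemoglobin", true)),
   ("Elevated Hemoglobin", ("Anemia", false)),
   ("Microcytosis", ("Macrocytosis", true)),
   ("Macrocytosis", ("Microcytosis", false))]

-- Source B's inner 'keep(k)' predicate (closes over the input dict d)
def pvKeep (d : PySem.Dict String Int) (k : String) : Bool :=
  match (PySem.Dict.mk pvPartnerPairs).get? k with
  | none => true
  | some info =>
    if d.contains info.1 then
      -- results[rival] is guarded by the containment test, so getD is exact
      decide (d.getD info.1 0 < d.getD k 0) || (d.getD info.1 0 == d.getD k 0 && info.2)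
    else true

def apply_medical_constraints_alt (results : List (String × Int)) : List (String × Int) :=
  let d := PySem.Dict.mk results
  d.items.filter (fun kv => pvKeep d kv.1)

-- ===== PRECONDITION & SPEC =====
def Spec_apply_medical_constraints (results : List (String × Int)) (out : List (String × Int)) : Prop := out = apply_medical_constraints_alt results
instance (results : List (String × Int)) (out : List (String × Int)) : Decidable (Spec_apply_medical_constraints results out) := by unfold Spec_apply_medical_constraints; infer_instance

-- ===== CLAIM (what is proved, stated in full; the proofs are below) =====
def Claim_equal_apply_medical_constraints : Prop := ∀ (results : List (String × Int)), Dom_apply_medical_constraints results → Spec_apply_medical_constraints results (apply_medical_constraints results)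

-- ===== LEMMAS AND PROOFS =====

theorem pv_any_filter_ne (l : List (String × Int)) (k k' : String) (h : k' ≠ k) :
    ((l.filter (fun p => !(p.1 == k))).any (fun p => p.1 == k'))
      = l.any (fun p => p.1 == k') := by
  induction l with
  | nil => rfl
  | cons p rest ih =>
    by_cases hk' : p.1 = k'
    · have hne : (p.1 == k) = false := by simp [hk', h]
      simp only [List.filter_cons, hne, Bool.not_false, if_true, List.any_cons, ih]
    · have hfk' : (p.1 == k') = false := by simp [hk']
      by_cases hk : p.1 = k
      · have hb : (p.1 == k) = true := by simp [hk]
        simp only [List.filter_cons, hb, Bool.not_true, Bool.false_eq_true, if_false, ih,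
          List.any_cons, hfk', Bool.false_or]
      · have hb : (p.1 == k) = false := by simp [hk]
        simp only [List.filter_cons, hb, Bool.not_false, if_true, List.any_cons, hfk',
          Bool.false_or, ih]

theorem pv_find?_filter_ne (l : List (String × Int)) (k k' : String) (h : k' ≠ k) :
    (l.filter (fun p => !(p.1 == k))).find? (fun p => p.1 == k')
      = l.find? (fun p => p.1 == k') := by
  induction l with
  | nil => rfl
  | cons p rest ih =>
    by_cases hk' : p.1 = k'
    · have hfk' : (p.1 == k') = true := by simp [hk']
      have hfk : (p.1 == k) = false := by simp [hk', h]
      simp only [List.filter_cons, hfk, Bool.not_false, if_true, List.find?_cons, hfk']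
    · by_cases hk : p.1 = k
      · have hfk : (p.1 == k) = true := by simp [hk]
        have hfk' : (p.1 == k') = false := by simp [hk']
        simp only [List.filter_cons, hfk, Bool.not_true, Bool.false_eq_true, if_false, ih,
          List.find?_cons, hfk']
      · have hfk : (p.1 == k) = false := by simp [hk]
        have hfk' : (p.1 == k') = false := by simp [hk']
        simp only [List.filter_cons, hfk, Bool.not_false, if_true, List.find?_cons, hfk', ih]

theorem dict_contains_erase_ne (d : PySem.Dict String Int) (k k' : String)
    (h : k' ≠ k) : (d.erase k).contains k' = d.contains k' := by
  obtain ⟨l⟩ := d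
  exact pv_any_filter_ne l k k' h

theorem dict_getD_erase_ne (d : PySem.Dict String Int) (k k' : String)
    (h : k' ≠ k) : (d.erase k).getD k' 0 = d.getD k' 0 := by
  obtain ⟨l⟩ := d
  simp only [PySem.Dict.getD, PySem.Dict.get?, PySem.Dict.erase]
  rw [pv_find?_filter_ne l k k' h]

def pvStepA (final : PySem.Dict String Int) (ab : String × String) : PySem.Dict String Int :=
  if final.contains ab.1 && final.contains ab.2 then
    if final.getD ab.1 0 ≥ final.getD ab.2 0 then final.erase ab.2 else final.erase ab.1
  else final

def pvCond (d : PySem.Dict String Int) (ab : String × String) : Bool :=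
  d.contains ab.1 && d.contains ab.2

def pvLoser (d : PySem.Dict String Int) (ab : String × String) : String :=
  if d.getD ab.1 0 ≥ d.getD ab.2 0 then ab.2 else ab.1

theorem pv_stepA_eq (d : PySem.Dict String Int) (ab : String × String) :
    pvStepA d ab = if pvCond d ab then d.erase (pvLoser d ab) else d := by
  unfold pvStepA pvCond pvLoser
  by_cases hc : (d.contains ab.1 && d.contains ab.2) = true <;>
    by_cases hg : d.getD ab.1 0 ≥ d.getD ab.2 0 <;> simp [hc, hg]

theorem pv_cond_erase (d : PySem.Dict String Int) (k : String) (ab : String × String)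
    (h1 : ab.1 ≠ k) (h2 : ab.2 ≠ k) : pvCond (d.erase k) ab = pvCond d ab := by
  unfold pvCond
  rw [dict_contains_erase_ne d k ab.1 h1, dict_contains_erase_ne d k ab.2 h2]

theorem pv_loser_erase (d : PySem.Dict String Int) (k : String) (ab : String × String)
    (h1 : ab.1 ≠ k) (h2 : ab.2 ≠ k) : pvLoser (d.erase k) ab = pvLoser d ab := by
  unfold pvLoser
  rw [dict_getD_erase_ne d k ab.1 h1, dict_getD_erase_ne d k ab.2 h2]

theorem pv_gen (cs : List (String × String)) (d : PySem.Dict String Int)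
    (h : (cs.flatMap (fun p => [p.1, p.2])).Nodup) :
    cs.foldl pvStepA d
      = ((cs.filter (fun ab => pvCond d ab)).map (pvLoser d)).foldl
          (fun f k => f.erase k) d := by
  induction cs generalizing d with
  | nil => rfl
  | cons ab cs ih =>
    have hn := h
    rw [List.flatMap_cons, List.nodup_append] at hn
    obtain ⟨hhead, htail, hdisj⟩ := hn
    have hfresh : ∀ k ∈ [ab.1, ab.2], ∀ ab' ∈ cs, ab'.1 ≠ k ∧ ab'.2 ≠ k := by
      intro k hk ab' hab'
      have h1 : ab'.1 ∈ cs.flatMap (fun p => [p.1, p.2]) :=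
        List.mem_flatMap.mpr ⟨ab', hab', by simp⟩
      have h2 : ab'.2 ∈ cs.flatMap (fun p => [p.1, p.2]) :=
        List.mem_flatMap.mpr ⟨ab', hab', by simp⟩
      exact ⟨(hdisj k hk ab'.1 h1).symm, (hdisj k hk ab'.2 h2).symm⟩
    have hloser_mem : pvLoser d ab ∈ [ab.1, ab.2] := by
      unfold pvLoser; split_ifs <;> simp
    simp only [List.foldl_cons, pv_stepA_eq d ab]
    by_cases hc : pvCond d ab = true
    · rw [if_pos hc]
      set l := pvLoser d ab with hl
      have hfilter : cs.filter (fun ab' => pvCond (d.erase l) ab')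
          = cs.filter (fun ab' => pvCond d ab') := by
        apply List.filter_congr
        intro ab' hab'
        rcases hfresh l hloser_mem ab' hab' with ⟨e1, e2⟩
        rw [pv_cond_erase d l ab' e1 e2]
      have hmap : (cs.filter (fun ab' => pvCond d ab')).map (pvLoser (d.erase l))
          = (cs.filter (fun ab' => pvCond d ab')).map (pvLoser d) := by
        apply List.map_congr_left
        intro ab' hab'
        have hmem : ab' ∈ cs := List.mem_of_mem_filter hab'
        rcases hfresh l hloser_mem ab' hmem with ⟨e1, e2⟩
        exact pv_loser_erase d l ab' e1 e2
      rw [ih (d.erase l) htail, hfilter, hmap]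
      simp only [List.filter_cons, hc, if_pos, List.map_cons, List.foldl_cons]
      rfl
    · rw [if_neg hc, ih d htail]
      have : (ab :: cs).filter (fun ab' => pvCond d ab') = cs.filter (fun ab' => pvCond d ab') := by
        simp [hc]
      rw [this]

-- the loser list, as a name
def pvLosers (d : PySem.Dict String Int) : List String :=
  (pvConflictsA.filter (fun ab => pvCond d ab)).map (pvLoser d)

-- a fold of erases over the raw dict is one filter of the underlying list
theorem pv_foldl_erase_items (L : List String) :
    ∀ (l : List (String × Int)),
    (L.foldl (fun f k => f.erase k) (PySem.Dict.mk l)).items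
      = l.filter (fun p => !(L.contains p.1)) := by
  induction L with
  | nil => intro l; simp
  | cons k L ih =>
    intro l
    have h1 : (PySem.Dict.mk l).erase k
        = PySem.Dict.mk (l.filter (fun p => !(p.1 == k))) := rfl
    rw [List.foldl_cons, h1, ih, List.filter_filter]
    apply List.filter_congr
    intro p _
    by_cases hk : p.1 = k <;> simp [hk]

theorem pv_contains_of_mem (l : List (String × Int)) (p : String × Int) (hp : p ∈ l) :
    (PySem.Dict.mk l).contains p.1 = true := by
  change l.any (fun q => q.1 == p.1) = true
  exact List.any_eq_true.mpr ⟨p, hp, by simp⟩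

theorem pv_losers_contains_gen (cs : List (String × String)) (d : PySem.Dict String Int)
    (k : String) :
    ((cs.filter (fun ab => pvCond d ab)).map (pvLoser d)).contains k
      = cs.any (fun ab => pvCond d ab && (pvLoser d ab == k)) := by
  induction cs with
  | nil => rfl
  | cons c cs ih =>
    rw [List.any_cons]
    by_cases hc : pvCond d c = true
    · rw [List.filter_cons_of_pos hc, List.map_cons, List.contains_cons, ih, hc, Bool.true_and]
      by_cases hl : pvLoser d c = k
      · simp [hl]
      · have h1 : (k == pvLoser d c) = false := beq_eq_false_iff_ne.mpr (fun h => hl h.symm)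
        have h2 : (pvLoser d c == k) = false := beq_eq_false_iff_ne.mpr hl
        simp only [h1, h2, Bool.false_or]
    · have hc' : pvCond d c = false := by simpa using hc
      rw [List.filter_cons_of_neg hc, ih, hc', Bool.false_and, Bool.false_or]

theorem pv_loser_ne (d : PySem.Dict String Int) (ab : String × String) (k : String)
    (h1 : ab.1 ≠ k) (h2 : ab.2 ≠ k) : (pvLoser d ab == k) = false := by
  unfold pvLoser; split_ifs <;> simp [h1, h2]

-- the two shapes of a named case: k is the pair's FIRST name (wins ties) …
theorem pv_caseA (d : PySem.Dict String Int) (a b : String) (hab : a ≠ b)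
    (hca : d.contains a = true) :
    (!(pvCond d (a, b) && (pvLoser d (a, b) == a)))
      = (if d.contains b then
          decide (d.getD b 0 < d.getD a 0) || (d.getD b 0 == d.getD a 0 && true)
        else true) := by
  unfold pvCond pvLoser
  have hba : (b == a) = false := beq_eq_false_iff_ne.mpr (Ne.symm hab)
  by_cases hcb : d.contains b = true
  · by_cases hge : d.getD a 0 ≥ d.getD b 0
    · simp [hca, hcb, hge, hba]
      omega
    · simp [hca, hcb, hge]
      omega
  · simp [hca, hcb]

-- … or the pair's SECOND name (loses ties)
theorem pv_caseB (d : PySem.Dict String Int) (a b : String) (hab : a ≠ b)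
    (hcb : d.contains b = true) :
    (!(pvCond d (a, b) && (pvLoser d (a, b) == b)))
      = (if d.contains a then
          decide (d.getD a 0 < d.getD b 0) || (d.getD a 0 == d.getD b 0 && false)
        else true) := by
  unfold pvCond pvLoser
  have hba : (a == b) = false := beq_eq_false_iff_ne.mpr hab
  by_cases hca : d.contains a = true
  · by_cases hge : d.getD a 0 ≥ d.getD b 0
    · simp [hca, hcb, hge]
    · simp [hca, hcb, hge, hba]
      omega
  · simp [hca, hcb]

-- the pointwise fact: "k is no conflict loser" IS Source B's keep(k), for k a key of the dict
theorem pv_keep_eq (results : List (String × Int)) (p : String × Int) (hp : p ∈ results) :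
    (!((pvLosers (PySem.Dict.mk results)).contains p.1))
      = pvKeep (PySem.Dict.mk results) p.1 := by
  obtain ⟨k, v⟩ := p
  have hck : (PySem.Dict.mk results).contains k = true :=
    pv_contains_of_mem results (k, v) hp
  set d := PySem.Dict.mk results with hd
  show (!((pvLosers d).contains k)) = pvKeep d k
  rw [pvLosers, pv_losers_contains_gen]
  by_cases h1 : k = "Leukopenia"
  · subst h1
    simp only [pvConflictsA, List.any_cons, List.any_nil,
      pv_loser_ne d ("Anemia", "Elevated Hemoglobin") "Leukopenia" (by decide) (by decide),
      pv_loser_ne d ("Microcytosis", "Macrocytosis") "Leukopenia" (by decide) (by decide),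
      Bool.and_false, Bool.or_false]
    rw [pv_caseA d "Leukopenia" "Leukocytosis" (by decide) hck]; rfl
  by_cases h2 : k = "Leukocytosis"
  · subst h2
    simp only [pvConflictsA, List.any_cons, List.any_nil,
      pv_loser_ne d ("Anemia", "Elevated Hemoglobin") "Leukocytosis" (by decide) (by decide),
      pv_loser_ne d ("Microcytosis", "Macrocytosis") "Leukocytosis" (by decide) (by decide),
      Bool.and_false, Bool.or_false]
    rw [pv_caseB d "Leukopenia" "Leukocytosis" (by decide) hck]; rfl
  by_cases h3 : k = "Anemia"
  · subst h3
    simp only [pvConflictsA, List.any_cons, List.any_nil,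
      pv_loser_ne d ("Leukopenia", "Leukocytosis") "Anemia" (by decide) (by decide),
      pv_loser_ne d ("Microcytosis", "Macrocytosis") "Anemia" (by decide) (by decide),
      Bool.and_false, Bool.false_or, Bool.or_false]
    rw [pv_caseA d "Anemia" "Elevated Hemoglobin" (by decide) hck]; rfl
  by_cases h4 : k = "Elevated Hemoglobin"
  · subst h4
    simp only [pvConflictsA, List.any_cons, List.any_nil,
      pv_loser_ne d ("Leukopenia", "Leukocytosis") "Elevated Hemoglobin" (by decide) (by decide),
      pv_loser_ne d ("Microcytosis", "Macrocytosis") "Elevated Hemoglobin" (by decide) (by decide),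
      Bool.and_false, Bool.false_or, Bool.or_false]
    rw [pv_caseB d "Anemia" "Elevated Hemoglobin" (by decide) hck]; rfl
  by_cases h5 : k = "Microcytosis"
  · subst h5
    simp only [pvConflictsA, List.any_cons, List.any_nil,
      pv_loser_ne d ("Leukopenia", "Leukocytosis") "Microcytosis" (by decide) (by decide),
      pv_loser_ne d ("Anemia", "Elevated Hemoglobin") "Microcytosis" (by decide) (by decide),
      Bool.and_false, Bool.false_or, Bool.or_false]
    rw [pv_caseA d "Microcytosis" "Macrocytosis" (by decide) hck]; rfl
  by_cases h6 : k = "Macrocytosis"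
  · subst h6
    simp only [pvConflictsA, List.any_cons, List.any_nil,
      pv_loser_ne d ("Leukopenia", "Leukocytosis") "Macrocytosis" (by decide) (by decide),
      pv_loser_ne d ("Anemia", "Elevated Hemoglobin") "Macrocytosis" (by decide) (by decide),
      Bool.and_false, Bool.false_or, Bool.or_false]
    rw [pv_caseB d "Microcytosis" "Macrocytosis" (by decide) hck]; rfl
  · -- k is none of the six names: no loser matches and the partner table misses it
    have e1 : ("Leukopenia" == k) = false := beq_eq_false_iff_ne.mpr (fun h => h1 h.symm)
    have e2 : ("Leukocytosis" == k) = false := beq_eq_false_iff_ne.mpr (fun h => h2 h.symm)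
    have e3 : ("Anemia" == k) = false := beq_eq_false_iff_ne.mpr (fun h => h3 h.symm)
    have e4 : ("Elevated Hemoglobin" == k) = false := beq_eq_false_iff_ne.mpr (fun h => h4 h.symm)
    have e5 : ("Microcytosis" == k) = false := beq_eq_false_iff_ne.mpr (fun h => h5 h.symm)
    have e6 : ("Macrocytosis" == k) = false := beq_eq_false_iff_ne.mpr (fun h => h6 h.symm)
    have hnone : (PySem.Dict.mk pvPartnerPairs).get? k = none := by
      show (pvPartnerPairs.find? (fun q => q.1 == k)).map (fun q => q.2) = none
      rw [pvPartnerPairs,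
        List.find?_cons_of_neg (by simp [e1]), List.find?_cons_of_neg (by simp [e2]),
        List.find?_cons_of_neg (by simp [e3]), List.find?_cons_of_neg (by simp [e4]),
        List.find?_cons_of_neg (by simp [e5]), List.find?_cons_of_neg (by simp [e6]),
        List.find?_nil]
      rfl
    simp only [pvConflictsA, List.any_cons, List.any_nil,
      pv_loser_ne d ("Leukopenia", "Leukocytosis") k (fun h => h1 h.symm) (fun h => h2 h.symm),
      pv_loser_ne d ("Anemia", "Elevated Hemoglobin") k (fun h => h3 h.symm) (fun h => h4 h.symm),
      pv_loser_ne d ("Microcytosis", "Macrocytosis") k (fun h => h5 h.symm) (fun h => h6 h.symm),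
      Bool.and_false, Bool.or_false]
    simp [pvKeep, hnone]

-- ===== VERDICT =====
theorem apply_medical_constraints_spec : Claim_equal_apply_medical_constraints := by
  intro results _
  unfold Spec_apply_medical_constraints
  unfold apply_medical_constraints apply_medical_constraints_alt
  show (pvConflictsA.foldl pvStepA (PySem.Dict.mk results)).items
      = results.filter (fun kv => pvKeep (PySem.Dict.mk results) kv.1)
  have hnodup : (pvConflictsA.flatMap (fun p => [p.1, p.2])).Nodup := by decide
  rw [pv_gen pvConflictsA (PySem.Dict.mk results) hnodup]
  have hfold := pv_foldl_erase_items (pvLosers (PySem.Dict.mk results)) results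
  rw [pvLosers] at hfold
  rw [hfold]
  apply List.filter_congr
  intro p hp
  rw [← pvLosers, pv_keep_eq results p hp]
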